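-- pv_equiv track=rewrite | github.com/MKowal2/NetDissect | src_video/data_utils.py | sum_histogram
-- ===== SOURCE A (Python) =====
-- def sum_histogram(histogram_list):
--     '''Adds histogram dictionaries elementwise.'''
--     result = {}
--     for d in histogram_list:
--         for k, v in d.items():
--             if not k == 'video_name':
--                 if k not in result:
--                     result[k] = v
--                 else:
--                     result[k] += v
--     return result
-- ===== SOURCE B (Python) =====
-- def sum_histogram(histogram_list):
--     '''Adds histogram dictionaries elementwise.'''
--     keys = dict.fromkeys(k for d in histogram_list
--                          for k in d if k != 'video_name')
--     return {k: sum(d[k] for d in histogram_list if k in d) for k in keys}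
-- ===== Notes on version B (the rewrite author's own statement) =====
-- stated objective: alternative
-- what changed: Replaces A's single left-to-right accumulation into a growing result dict by a two-pass transposition: first collect the ordered set of keys (dict.fromkeys), then sum each key across all dicts in a comprehension.
import Mathlib
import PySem

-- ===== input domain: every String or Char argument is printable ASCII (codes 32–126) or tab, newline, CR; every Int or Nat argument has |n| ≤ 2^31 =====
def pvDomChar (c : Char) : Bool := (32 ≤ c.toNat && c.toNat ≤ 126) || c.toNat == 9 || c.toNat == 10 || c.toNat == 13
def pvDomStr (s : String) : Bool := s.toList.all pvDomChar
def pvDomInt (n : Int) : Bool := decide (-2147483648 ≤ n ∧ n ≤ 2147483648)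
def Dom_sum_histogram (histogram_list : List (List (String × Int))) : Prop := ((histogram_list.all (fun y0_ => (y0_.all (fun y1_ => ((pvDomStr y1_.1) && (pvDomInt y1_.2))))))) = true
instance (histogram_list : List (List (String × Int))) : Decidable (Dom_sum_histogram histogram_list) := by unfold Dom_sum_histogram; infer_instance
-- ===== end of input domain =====

-- B replaces A's one-pass accumulation by a key-gathering pass plus a per-key summing pass
-- (different decomposition, same cost class); equivalence is on the return value.

-- ===== PORT A =====
-- result = {}; for d in histogram_list: for k, v in d.items(): if not k == 'video_name': ...
def sum_histogram (histogram_list : List (List (String × Int))) : List (String × Int) :=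
  (histogram_list.foldl (fun result d =>
      d.foldl (fun result kv =>
          if kv.1 = "video_name" then result
          else if !(result.contains kv.1) then result.insert kv.1 kv.2
          else result.insert kv.1 (result.getD kv.1 0 + kv.2))
        result)
    PySem.Dict.empty).items

-- ===== PORT B =====
-- keys = dict.fromkeys(k for d in histogram_list for k in d if k != 'video_name')
-- return {k: sum(d[k] for d in histogram_list if k in d) for k in keys}
def sum_histogram_alt (histogram_list : List (List (String × Int))) : List (String × Int) :=
  (histogram_list.foldl (fun ks d =>
      d.foldl (fun ks kv =>
          if kv.1 = "video_name" then ks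
          else if ks.contains kv.1 then ks else ks ++ [kv.1])
        ks)
    []).map (fun k => (k,
      histogram_list.foldl (fun acc d =>
          match (PySem.Dict.mk d).get? k with
          | some v => acc + v
          | none => acc)
        0))

-- ===== PRECONDITION & SPEC =====
-- Pre_ requires each inner association list to have distinct keys: the Python parameter is a
-- list of dicts, and a Python dict cannot hold duplicate keys, so lists with a repeated key
-- inside one inner list correspond to no Python input at all.
def Pre_sum_histogram (histogram_list : List (List (String × Int))) : Prop :=
  ∀ d ∈ histogram_list, (d.map Prod.fst).Nodup
instance (histogram_list : List (List (String × Int))) : Decidable (Pre_sum_histogram histogram_list) := by unfold Pre_sum_histogram; infer_instance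
def pvWitness_sum_histogram : (List (List (String × Int))) :=
  [[("a", 1), ("b", 2), ("video_name", 7)], [("b", 3)], []]
def Spec_sum_histogram (histogram_list : List (List (String × Int))) (out : List (String × Int)) : Prop := out = sum_histogram_alt histogram_list
instance (histogram_list : List (List (String × Int))) (out : List (String × Int)) : Decidable (Spec_sum_histogram histogram_list out) := by unfold Spec_sum_histogram; infer_instance

-- ===== CLAIM (what is proved, stated in full; the proofs are below) =====
def Claim_equal_sum_histogram : Prop := ∀ (histogram_list : List (List (String × Int))), Dom_sum_histogram histogram_list → Pre_sum_histogram histogram_list → Spec_sum_histogram histogram_list (sum_histogram histogram_list)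

-- ===== LEMMAS AND PROOFS =====

-- the keys of `ps` in order, minus 'video_name' (with multiplicity; dedup happens via Set.ofList)
def pvFK (ps : List (String × Int)) : List String :=
  ps.filterMap (fun p => if p.1 = "video_name" then none else some p.1)

-- total of the values attached to key k in ps
def pvS (k : String) (ps : List (String × Int)) : Int :=
  ((ps.filter (fun p => p.1 == k)).map (·.2)).sum

-- A's loop body, in modify form
def pvStep (r : PySem.Dict String Int) (p : String × Int) : PySem.Dict String Int :=
  if p.1 = "video_name" then r else r.modify p.1 0 (· + p.2)

theorem pvStepA_eq (r : PySem.Dict String Int) (p : String × Int) :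
    (if p.1 = "video_name" then r
     else if !(r.contains p.1) then r.insert p.1 p.2
     else r.insert p.1 (r.getD p.1 0 + p.2)) = pvStep r p := by
  unfold pvStep PySem.Dict.modify
  by_cases hv : p.1 = "video_name"
  · simp [hv]
  · rw [if_neg hv, if_neg hv]
    by_cases hc : r.contains p.1 = true
    · simp [hc]
    · have hc' : r.contains p.1 = false := by simpa using hc
      rw [PySem.Dict.getD_of_not_contains r 0 hc']
      simp [hc']

theorem pvFoldl_flat {α : Type} (hl : List (List (String × Int))) (f : α → (String × Int) → α)
    (a : α) : hl.foldl (fun r d => d.foldl f r) a = (hl.flatMap id).foldl f a := by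
  induction hl generalizing a with
  | nil => rfl
  | cons d t ih => simp [List.foldl_append, ih]

theorem pvKeys_step (r : PySem.Dict String Int) (p : String × Int) :
    (pvStep r p).keys = if p.1 = "video_name" then r.keys else PySem.Set.add r.keys p.1 := by
  unfold pvStep PySem.Dict.modify PySem.Set.add
  by_cases hv : p.1 = "video_name"
  · simp [hv]
  · rw [if_neg hv, if_neg hv]
    by_cases hc : r.contains p.1 = true
    · have hm : p.1 ∈ r.keys := (PySem.Dict.contains_iff_mem_keys r p.1).mp hc
      rw [PySem.Dict.keys_insert_of_contains r _ hc, if_pos (by simpa using hm)]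
    · have hc' : r.contains p.1 = false := by simpa using hc
      have hm : p.1 ∉ r.keys := fun h => hc ((PySem.Dict.contains_iff_mem_keys r p.1).mpr h)
      rw [PySem.Dict.keys_insert_of_not_contains r _ hc', if_neg (by simpa using hm)]

theorem pvKeys_foldl (ps : List (String × Int)) (r : PySem.Dict String Int) :
    (ps.foldl pvStep r).keys
      = ps.foldl (fun ks p => if p.1 = "video_name" then ks else PySem.Set.add ks p.1) r.keys := by
  induction ps generalizing r with
  | nil => rfl
  | cons p t ih => simp [ih, pvKeys_step]

theorem pvKeyfold_eq_update (ps : List (String × Int)) (s : PySem.Set String) :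
    ps.foldl (fun ks p => if p.1 = "video_name" then ks else PySem.Set.add ks p.1) s
      = s.update (pvFK ps) := by
  induction ps generalizing s with
  | nil => rw [List.foldl_nil]; exact (PySem.Set.update_nil s).symm
  | cons p t ih =>
      by_cases hv : p.1 = "video_name"
      · rw [List.foldl_cons, if_pos hv, ih]
        congr 1
        simp [pvFK, hv]
      · rw [List.foldl_cons, if_neg hv, ih]
        have hfk : pvFK (p :: t) = p.1 :: pvFK t := by simp [pvFK, hv]
        rw [hfk, PySem.Set.update_cons]

theorem pvS_cons (k : String) (p : String × Int) (t : List (String × Int)) :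
    pvS k (p :: t) = (if p.1 = k then p.2 else 0) + pvS k t := by
  by_cases h : p.1 = k <;> simp [pvS, h]

theorem pvS_eq_zero {k : String} {ps : List (String × Int)} (h : k ∉ ps.map Prod.fst) :
    pvS k ps = 0 := by
  induction ps with
  | nil => rfl
  | cons p t ih =>
      simp only [List.map_cons, List.mem_cons, not_or] at h
      rw [pvS_cons, if_neg (fun e => h.1 e.symm), ih h.2]
      ring

theorem pvS_append (k : String) (ps qs : List (String × Int)) :
    pvS k (ps ++ qs) = pvS k ps + pvS k qs := by
  simp [pvS]

theorem pvGetD_foldl (ps : List (String × Int)) (r : PySem.Dict String Int) (k : String)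
    (hk : k ≠ "video_name") :
    (ps.foldl pvStep r).getD k 0 = r.getD k 0 + pvS k ps := by
  induction ps generalizing r with
  | nil => simp [pvS]
  | cons p t ih =>
      rw [List.foldl_cons, pvS_cons, ih]
      unfold pvStep
      by_cases hv : p.1 = "video_name"
      · have hpk : ¬ p.1 = k := fun e => hk (e ▸ hv)
        rw [if_pos hv, if_neg hpk]
        ring
      · rw [if_neg hv, PySem.Dict.getD_modify]
        by_cases hpk : k = p.1
        · rw [if_pos hpk, if_pos hpk.symm, hpk]
          ring
        · rw [if_neg hpk, if_neg (fun e => hpk e.symm)]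
          ring

-- one dict's contribution in B equals the values it holds at k, given distinct keys
theorem pvLookup_eq_S (d : List (String × Int)) (k : String)
    (hnd : (d.map Prod.fst).Nodup) :
    (match (PySem.Dict.mk d).get? k with | some v => v | none => 0) = pvS k d := by
  induction d with
  | nil => rfl
  | cons p t ih =>
      obtain ⟨k1, v1⟩ := p
      simp only [List.map_cons, List.nodup_cons] at hnd
      rw [pvS_cons, PySem.Dict.get?_mk_cons]
      by_cases h : k1 = k
      · subst h
        simp [pvS_eq_zero hnd.1]
      · simpa [h] using ih hnd.2

theorem pvBSum (hl : List (List (String × Int))) (k : String) (acc : Int)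
    (hnd : ∀ d ∈ hl, (d.map Prod.fst).Nodup) :
    hl.foldl (fun acc d =>
        match (PySem.Dict.mk d).get? k with
        | some v => acc + v
        | none => acc) acc
      = acc + pvS k (hl.flatMap id) := by
  induction hl generalizing acc with
  | nil => simp [pvS]
  | cons d t ih =>
      have hd := hnd d (by simp)
      have ht : ∀ d' ∈ t, (d'.map Prod.fst).Nodup := fun d' h => hnd d' (by simp [h])
      have hstep : (match (PySem.Dict.mk d).get? k with
          | some v => acc + v
          | none => acc) = acc + pvS k d := by
        have hv := pvLookup_eq_S d k hd
        cases hg : (PySem.Dict.mk d).get? k <;> rw [hg] at hv <;> simp at hv ⊢ <;> omega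
      rw [List.foldl_cons, hstep, ih _ ht]
      simp only [List.flatMap_cons, id_eq, pvS_append]
      ring

theorem pvMem_fk_ne_video {k : String} {ps : List (String × Int)}
    (h : k ∈ pvFK ps) : k ≠ "video_name" := by
  intro he
  simp only [pvFK, List.mem_filterMap] at h
  obtain ⟨p, _, hp⟩ := h
  by_cases hv : p.1 = "video_name"
  · simp [hv] at hp
  · simp [hv] at hp
    exact hv (hp.trans he)

theorem pvA_items (hl : List (List (String × Int))) :
    sum_histogram hl = ((hl.flatMap id).foldl pvStep PySem.Dict.empty).items := by
  unfold sum_histogram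
  rw [show (fun (result : PySem.Dict String Int) (kv : String × Int) =>
        if kv.1 = "video_name" then result
        else if !(result.contains kv.1) then result.insert kv.1 kv.2
        else result.insert kv.1 (result.getD kv.1 0 + kv.2)) = pvStep from
      funext fun r => funext fun p => pvStepA_eq r p]
  rw [pvFoldl_flat]

-- ===== VERDICT (by name: the statement is the Claim_ definition above) =====
theorem sum_histogram_spec : Claim_equal_sum_histogram := by
  intro hl _ hpre
  unfold Spec_sum_histogram sum_histogram_alt
  rw [pvA_items]
  rw [show (fun (ks : List String) (kv : String × Int) =>
        if kv.1 = "video_name" then ks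
        else if ks.contains kv.1 then ks else ks ++ [kv.1])
      = (fun ks p => if p.1 = "video_name" then ks else PySem.Set.add ks p.1) from rfl]
  rw [pvFoldl_flat, pvKeyfold_eq_update]
  set ps := hl.flatMap id with hps
  have hkeys : ((ps.foldl pvStep PySem.Dict.empty).keys) = PySem.Set.ofList (pvFK ps) := by
    rw [pvKeys_foldl, pvKeyfold_eq_update, PySem.Dict.keys_empty]
    exact PySem.Set.update_empty _
  have hnodup : ((ps.foldl pvStep PySem.Dict.empty).keys).Nodup := by
    rw [hkeys]; exact PySem.Set.nodup_ofList _
  rw [PySem.Dict.items_eq_map_keys _ hnodup 0, hkeys,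
      show (PySem.Set.update ([] : List String) (pvFK ps)) = PySem.Set.ofList (pvFK ps) from
        PySem.Set.update_empty _]
  apply List.map_congr_left
  intro k hk
  have hkv : k ≠ "video_name" := pvMem_fk_ne_video ((PySem.Set.mem_ofList _ _).mp hk)
  rw [pvGetD_foldl ps _ k hkv, pvBSum hl k 0 hpre, ← hps]
  simp [PySem.Dict.getD_empty]
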